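-- pv_equiv track=rewrite | github.com/gopichandblr02/python_qns | Qns_GeeksForGeeks/gfg_stack_solutions.py | is_valid_stack_permutation
-- ===== SOURCE A (Python) =====
-- from typing import List, Optional
--
-- def is_valid_stack_permutation(push_seq: List[int], pop_seq: List[int]) -> bool:
--     st = []
--     j = 0
--     for x in push_seq:
--         st.append(x)
--         while st and j < len(pop_seq) and st[-1] == pop_seq[j]:
--             st.pop()
--             j += 1
--     return j == len(pop_seq)
-- ===== SOURCE B (Python) =====
-- from typing import List
--
-- def is_valid_stack_permutation(push_seq: List[int], pop_seq: List[int]) -> bool: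
--     st = []
--     i = 0
--     for x in pop_seq:
--         while i < len(push_seq) and (not st or st[-1] != x):
--             st.append(push_seq[i])
--             i += 1
--         if st and st[-1] == x:
--             st.pop()
--         else:
--             return False
--     return True
-- ===== Notes on version B (the rewrite author's own statement) =====
-- stated objective: alternative
-- what changed: B inverts the simulation: instead of iterating over push_seq and greedily popping matches of pop_seq, B iterates over pop_seq and lazily pushes from push_seq until the required top appears, returning False at the first unsatisfiable pop.
import Mathlib
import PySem

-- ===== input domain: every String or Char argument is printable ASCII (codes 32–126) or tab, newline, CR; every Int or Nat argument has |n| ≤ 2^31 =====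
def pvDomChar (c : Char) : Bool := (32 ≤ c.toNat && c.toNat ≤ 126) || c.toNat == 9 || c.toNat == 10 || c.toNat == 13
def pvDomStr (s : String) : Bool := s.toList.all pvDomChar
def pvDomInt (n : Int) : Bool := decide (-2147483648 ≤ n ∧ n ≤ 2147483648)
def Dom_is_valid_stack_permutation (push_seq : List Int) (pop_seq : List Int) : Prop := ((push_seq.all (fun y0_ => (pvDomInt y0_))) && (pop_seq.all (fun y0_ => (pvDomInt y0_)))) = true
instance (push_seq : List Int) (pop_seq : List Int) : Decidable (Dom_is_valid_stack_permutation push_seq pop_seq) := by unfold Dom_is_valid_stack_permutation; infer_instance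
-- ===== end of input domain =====

-- B replaces A's push-driven greedy simulation by the dual pop-driven lazy simulation (alternative decomposition, same cost).
-- Stacks are represented top-first (head = Python st[-1]).

-- ===== PORT A =====
-- inner while loop of A: while st and j < len(pop_seq) and st[-1] == pop_seq[j]: st.pop(); j += 1
def aDrain (pop : List Int) (st : List Int) (j : Nat) : List Int × Nat :=
  match st with
  | [] => ([], j)
  | s :: st' =>
    if h : j < pop.length ∧ s = pop[j]! then
      aDrain pop st' (j + 1)
    else
      (s :: st', j)
termination_by pop.length - j
decreasing_by omega

def is_valid_stack_permutation (push_seq : List Int) (pop_seq : List Int) : Bool :=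
  let r := push_seq.foldl (fun (s : List Int × Nat) x => aDrain pop_seq (x :: s.1) s.2) ([], 0)
  r.2 == pop_seq.length

-- ===== PORT B =====
-- inner while loop of B: while i < len(push_seq) and (not st or st[-1] != x): st.append(push_seq[i]); i += 1
def altInner (push : List Int) (x : Int) (i : Nat) (st : List Int) : Nat × List Int :=
  if h : i < push.length ∧ (st = [] ∨ st.head? ≠ some x) then
    altInner push x (i + 1) (push[i]! :: st)
  else
    (i, st)
termination_by push.length - i
decreasing_by omega

-- outer for loop of B over pop_seq, with early return False
def altOuter (push : List Int) (pop : List Int) (i : Nat) (st : List Int) : Bool :=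
  match pop with
  | [] => true
  | x :: pop' =>
    let p := altInner push x i st
    match p.2 with
    | y :: st' => if y = x then altOuter push pop' p.1 st' else false
    | [] => false

def is_valid_stack_permutation_alt (push_seq : List Int) (pop_seq : List Int) : Bool :=
  altOuter push_seq pop_seq 0 []

-- ===== PRECONDITION & SPEC =====
def Spec_is_valid_stack_permutation (push_seq : List Int) (pop_seq : List Int) (out : Bool) : Prop := out = is_valid_stack_permutation_alt push_seq pop_seq
instance (push_seq : List Int) (pop_seq : List Int) (out : Bool) : Decidable (Spec_is_valid_stack_permutation push_seq pop_seq out) := by unfold Spec_is_valid_stack_permutation; infer_instance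

-- ===== CLAIM (what is proved, stated in full; the proofs are below) =====
def Claim_equal_is_valid_stack_permutation : Prop := ∀ (push_seq : List Int) (pop_seq : List Int), Dom_is_valid_stack_permutation push_seq pop_seq → Spec_is_valid_stack_permutation push_seq pop_seq (is_valid_stack_permutation push_seq pop_seq)

-- ===== LEMMAS AND PROOFS =====

-- reference recursion both ports are reduced to
def check (push st rem : List Int) : Bool :=
  match rem with
  | [] => true
  | x :: rem' =>
    if st.head? = some x then check push st.tail rem'
    else match push with
      | [] => false
      | p :: push' => check push' (p :: st) (x :: rem')
termination_by (rem.length, push.length)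

theorem check_nil (push st : List Int) : check push st [] = true := by
  rw [check.eq_def]

theorem check_pop (push st : List Int) (x : Int) (rem : List Int) (h : st.head? = some x) :
    check push st (x :: rem) = check push st.tail rem := by
  rw [check.eq_def]; simp [h]

theorem check_push (push' st : List Int) (p x : Int) (rem : List Int) (h : st.head? ≠ some x) :
    check (p :: push') st (x :: rem) = check push' (p :: st) (x :: rem) := by
  rw [check.eq_def]; simp [h]

theorem check_dead (st : List Int) (x : Int) (rem : List Int) (h : st.head? ≠ some x) :
    check [] st (x :: rem) = false := by
  rw [check.eq_def]; simp [h]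

-- "the inner while-loop of A cannot fire": stopping condition of aDrain
def Stopped (pop st : List Int) (j : Nat) : Prop :=
  ∀ s st', st = s :: st' → ¬ (j < pop.length ∧ s = pop[j]!)

theorem aDrain_le (pop st : List Int) (j : Nat) (hj : j ≤ pop.length) :
    (aDrain pop st j).2 ≤ pop.length := by
  fun_induction aDrain pop st j with
  | case1 => simpa using hj
  | case2 j s st' h ih => exact ih (by omega)
  | case3 => simpa using hj

theorem aDrain_stopped (pop st : List Int) (j : Nat) :
    Stopped pop (aDrain pop st j).1 (aDrain pop st j).2 := by
  fun_induction aDrain pop st j with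
  | case1 => intro s st' h; simp at h
  | case2 j s st' h ih => exact ih
  | case3 j s st' h =>
    intro a b hab
    injection hab with h1 h2
    subst h1
    exact h

theorem check_aDrain (pop st : List Int) (j : Nat) (q : List Int) (hj : j ≤ pop.length) :
    check q st (pop.drop j) = check q (aDrain pop st j).1 (pop.drop (aDrain pop st j).2) := by
  fun_induction aDrain pop st j with
  | case1 => rfl
  | case2 j s st' h ih =>
    rw [← ih (by omega)]
    have hs : s = pop[j] := h.2.trans (getElem!_pos pop j h.1)
    rw [List.drop_eq_getElem_cons h.1, check_pop q (s :: st') _ _ (by simp [hs])]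
    simp only [List.tail_cons]
  | case3 => rfl

theorem check_stopped_nil (pop st : List Int) (j : Nat) (hj : j < pop.length)
    (hst : Stopped pop st j) : check [] st (pop.drop j) = false := by
  rw [List.drop_eq_getElem_cons hj]
  cases st with
  | nil => exact check_dead [] _ _ (by simp)
  | cons s st' =>
    have hs : s ≠ pop[j] := by
      intro he
      exact hst s st' rfl ⟨hj, he.trans (getElem!_pos pop j hj).symm⟩
    exact check_dead (s :: st') _ _ (by simp [hs])

theorem foldA (pop : List Int) (push : List Int) :
    ∀ (st : List Int) (j : Nat), j ≤ pop.length → Stopped pop st j →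
    ((push.foldl (fun (s : List Int × Nat) x => aDrain pop (x :: s.1) s.2) (st, j)).2
        == pop.length) = check push st (pop.drop j) := by
  induction push with
  | nil =>
    intro st j hj hst
    simp only [List.foldl_nil]
    by_cases h : j = pop.length
    · subst h; rw [List.drop_length, check_nil]; simp
    · have hlt : j < pop.length := by omega
      rw [check_stopped_nil pop st j hlt hst]
      simp [h]
  | cons x push' ih =>
    intro st j hj hst
    simp only [List.foldl_cons]
    rcases hA : aDrain pop (x :: st) j with ⟨st1, j1⟩
    have hle := aDrain_le pop (x :: st) j hj
    have hstp := aDrain_stopped pop (x :: st) j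
    have hck := check_aDrain pop (x :: st) j push' hj
    rw [hA] at hle hstp hck
    dsimp only at hle hstp hck
    rw [ih st1 j1 hle hstp, ← hck]
    by_cases h : j = pop.length
    · subst h; rw [List.drop_length, check_nil, check_nil]
    · have hlt : j < pop.length := by omega
      rw [List.drop_eq_getElem_cons hlt]
      cases st with
      | nil => rw [check_push _ _ _ _ _ (by simp)]
      | cons s st'' =>
        have hs : s ≠ pop[j] := by
          intro he
          exact hst s st'' rfl ⟨hlt, he.trans (getElem!_pos pop j hlt).symm⟩
        rw [check_push _ _ _ _ _ (by simp [hs])]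

theorem altInner_le (push : List Int) (x : Int) (i : Nat) (st : List Int)
    (hi : i ≤ push.length) : (altInner push x i st).1 ≤ push.length := by
  fun_induction altInner push x i st with
  | case1 i st h ih => exact ih (by omega)
  | case2 => simpa using hi

theorem altInner_stopped (push : List Int) (x : Int) (i : Nat) (st : List Int) :
    ¬ ((altInner push x i st).1 < push.length ∧
       ((altInner push x i st).2 = [] ∨ (altInner push x i st).2.head? ≠ some x)) := by
  fun_induction altInner push x i st with
  | case1 i st h ih => exact ih
  | case2 i st h => simpa [altInner, h] using h

theorem altInner_check (push : List Int) (x : Int) (i : Nat) (st : List Int)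
    (hi : i ≤ push.length) (rem : List Int) :
    check (push.drop i) st (x :: rem)
      = check (push.drop (altInner push x i st).1) (altInner push x i st).2 (x :: rem) := by
  fun_induction altInner push x i st with
  | case1 i st h ih =>
    rw [← ih (by omega)]
    have hhd : st.head? ≠ some x := by
      rcases h.2 with h2 | h2
      · subst h2; simp
      · exact h2
    have hp : push[i]! = push[i] := getElem!_pos push i h.1
    rw [List.drop_eq_getElem_cons h.1, check_push _ _ _ _ _ hhd, hp]
  | case2 => rfl

theorem alt_check (push : List Int) :
    ∀ (rem : List Int) (i : Nat) (st : List Int), i ≤ push.length →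
    altOuter push rem i st = check (push.drop i) st rem := by
  intro rem
  induction rem with
  | nil => intro i st hi; rw [check_nil]; rfl
  | cons x rem' ih =>
    intro i st hi
    rw [altInner_check push x i st hi rem']
    have hle := altInner_le push x i st hi
    have hstp := altInner_stopped push x i st
    rcases hm : (altInner push x i st).2 with _ | ⟨y, st'⟩
    · have hend : push.drop (altInner push x i st).1 = [] := by
        apply List.drop_eq_nil_of_le
        by_contra hc
        exact hstp ⟨by omega, Or.inl hm⟩
      rw [hend, check_dead _ _ _ (by simp)]
      simp [altOuter, hm]
    · by_cases hy : y = x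
      · subst hy
        rw [check_pop _ _ _ _ (by simp)]
        simp only [List.tail_cons]
        rw [← ih (altInner push y i st).1 st' hle]
        simp [altOuter, hm]
      · have hend : push.drop (altInner push x i st).1 = [] := by
          apply List.drop_eq_nil_of_le
          by_contra hc
          exact hstp ⟨by omega, Or.inr (by simp [hm, hy])⟩
        rw [hend, check_dead _ _ _ (by simp [hy])]
        simp [altOuter, hm, hy]

-- ===== VERDICT (by name: the statement is the Claim_ definition above) =====
theorem is_valid_stack_permutation_spec : Claim_equal_is_valid_stack_permutation := by
  intro push pop _
  unfold Spec_is_valid_stack_permutation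
  have ha : is_valid_stack_permutation push pop = check push [] pop := by
    have h := foldA pop push [] 0 (Nat.zero_le _) (by intro s st' hab; simp at hab)
    rw [List.drop_zero] at h
    exact h
  have hb : is_valid_stack_permutation_alt push pop = check push [] pop := by
    have h := alt_check push pop 0 [] (Nat.zero_le _)
    rw [List.drop_zero] at h
    exact h
  rw [ha, hb]
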